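-- pv_equiv track=rewrite | github.com/yaoamegandjin/competitive_programming | ride.py | nameToNumber
-- ===== SOURCE A (Python) =====
-- def nameToNumber(name):
--     numberEquivOfName = 1
--     letters = ["A", "B", "C", "D", "E", "F", "G", "H", "I", "J", "K", "L", "M", "N", "O", "P", "Q", "R", "S", "T", "U", "V", "W", "X", "Y", "Z"]
--     numbers = list(range(1, 27))
--     for i in range(len(letters)):
--         for j in name:
--             if j == letters[i]:
--                 numberEquivOfName *= numbers[i]
--     return numberEquivOfName
-- ===== SOURCE B (Python) =====
-- def nameToNumber(name):
--     result = 1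
--     for c in name:
--         if 'A' <= c <= 'Z':
--             result *= ord(c) - ord('A') + 1
--     return result
-- ===== Notes on version B (the rewrite author's own statement) =====
-- stated objective: simpler
-- what changed: Replaced the 26-letter outer loop with its inner scans and the letters/numbers lookup lists by a single pass over the characters that multiplies the accumulator by ord(c)-64 for each uppercase letter.
import Mathlib
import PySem

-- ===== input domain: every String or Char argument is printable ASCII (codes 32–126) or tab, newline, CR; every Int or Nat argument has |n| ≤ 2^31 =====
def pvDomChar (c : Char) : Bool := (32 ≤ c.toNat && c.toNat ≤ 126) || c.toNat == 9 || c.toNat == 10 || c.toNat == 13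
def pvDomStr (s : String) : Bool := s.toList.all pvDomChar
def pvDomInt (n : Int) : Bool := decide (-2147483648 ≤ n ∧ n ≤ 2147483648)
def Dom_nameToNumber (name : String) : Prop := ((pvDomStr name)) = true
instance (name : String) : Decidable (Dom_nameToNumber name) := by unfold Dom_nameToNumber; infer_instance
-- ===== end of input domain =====

-- B replaces A's 26-letter outer loop with inner scans of the name by a single pass over
-- the name multiplying by ord(c)-64 for each uppercase letter (objective: simpler).

-- ===== PORT A =====
-- A's `letters` list
def pvLetters : List Char :=
  ['A', 'B', 'C', 'D', 'E', 'F', 'G', 'H', 'I', 'J', 'K', 'L', 'M',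
   'N', 'O', 'P', 'Q', 'R', 'S', 'T', 'U', 'V', 'W', 'X', 'Y', 'Z']
-- A's `numbers = list(range(1, 27))`
def pvNumbers : List Int := PySem.List.pyRange 1 27 1

def nameToNumber (name : String) : Int :=
  (List.range pvLetters.length).foldl
    (fun acc i =>
      name.toList.foldl
        (fun a j => if j = pvLetters.getD i ' ' then a * pvNumbers.getD i 0 else a) acc)
    1

-- ===== PORT B =====
def nameToNumber_alt (name : String) : Int :=
  name.toList.foldl
    (fun a c => if 'A' ≤ c ∧ c ≤ 'Z' then a * ((c.toNat : Int) - 65 + 1) else a) 1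

-- ===== PRECONDITION & SPEC =====
def Spec_nameToNumber (name : String) (out : Int) : Prop := out = nameToNumber_alt name
instance (name : String) (out : Int) : Decidable (Spec_nameToNumber name out) := by unfold Spec_nameToNumber; infer_instance

-- ===== CLAIM (what is proved, stated in full; the proofs are below) =====
def Claim_equal_nameToNumber : Prop := ∀ (name : String), Dom_nameToNumber name → Spec_nameToNumber name (nameToNumber name)

-- ===== LEMMAS AND PROOFS =====

-- a guarded multiplying foldl is the start value times a product of guarded factors
theorem pv_foldl_if_mul (P : Char → Prop) [DecidablePred P] (v : Char → Int)
    (l : List Char) (acc : Int) :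
    l.foldl (fun a j => if P j then a * v j else a) acc
      = acc * (l.map (fun j => if P j then v j else 1)).prod := by
  induction l generalizing acc with
  | nil => simp
  | cons x xs ih =>
      simp only [List.foldl_cons, List.map_cons, List.prod_cons, ih]
      split <;> ring

-- a multiplying foldl over the letter indices is the start value times a product
theorem pv_foldl_mul (g : Nat → Int) (I : List Nat) (acc : Int) :
    I.foldl (fun a i => a * g i) acc = acc * (I.map g).prod := by
  induction I generalizing acc with
  | nil => simp
  | cons x xs ih => simp only [List.foldl_cons, List.map_cons, List.prod_cons, ih]; ring

-- exchanging the two product orders (letters outside vs characters outside)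
theorem pv_prod_swap (I : List Nat) (t : Nat → Char → Int) (l : List Char) :
    (I.map (fun i => (l.map (t i)).prod)).prod
      = (l.map (fun j => (I.map (fun i => t i j)).prod)).prod := by
  induction l with
  | nil => simp
  | cons x xs ih =>
      simp only [List.map_cons, List.prod_cons, ← ih, ← List.prod_map_mul]

-- per-character value of A's letter scan, for any character in the domain
theorem pv_char_factor (j : Char) (hj : pvDomChar j = true) :
    ((List.range pvLetters.length).map
        (fun i => if j = pvLetters.getD i ' ' then pvNumbers.getD i 0 else 1)).prod
      = (if 'A' ≤ j ∧ j ≤ 'Z' then ((j.toNat : Int) - 65 + 1) else 1) := by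
  have hje : ∀ c : Char, (j = c) ↔ (j.toNat = c.toNat) := by
    intro c
    constructor
    · rintro rfl; rfl
    · intro h; exact Char.ext (UInt32.toNat_inj.mp h)
  have hle : ∀ c : Char, (c ≤ j) ↔ (c.toNat ≤ j.toNat) := by
    intro c; rw [Char.le_def]; exact UInt32.le_iff_toNat_le
  have hge : ∀ c : Char, (j ≤ c) ↔ (j.toNat ≤ c.toNat) := by
    intro c; rw [Char.le_def]; exact UInt32.le_iff_toNat_le
  have hub : j.toNat ≤ 126 := by
    simp [pvDomChar] at hj; omega
  simp only [hje, hle, hge]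
  generalize j.toNat = k at hub ⊢
  interval_cases k <;> decide

-- ===== VERDICT (by name: the statement is the Claim_ definition above) =====
theorem nameToNumber_spec : Claim_equal_nameToNumber := by
  intro name hdom
  unfold Spec_nameToNumber nameToNumber nameToNumber_alt
  have hstep :
      (fun (acc : Int) (i : Nat) =>
        name.toList.foldl
          (fun a j => if j = pvLetters.getD i ' ' then a * pvNumbers.getD i 0 else a) acc)
      = (fun (acc : Int) (i : Nat) =>
        acc * (name.toList.map
          (fun j => if j = pvLetters.getD i ' ' then pvNumbers.getD i 0 else 1)).prod) := by
    funext acc i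
    exact pv_foldl_if_mul (fun j => j = pvLetters.getD i ' ') _ _ _
  rw [hstep, pv_foldl_mul, one_mul, pv_prod_swap,
      pv_foldl_if_mul (fun c => 'A' ≤ c ∧ c ≤ 'Z') (fun c => (c.toNat : Int) - 65 + 1),
      one_mul]
  refine congrArg List.prod (List.map_congr_left ?_)
  intro j hjmem
  have hj : pvDomChar j = true := by
    have := hdom
    unfold Dom_nameToNumber pvDomStr at this
    exact (List.all_eq_true.mp this) j hjmem
  exact pv_char_factor j hj
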